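-- pv_equiv track=rewrite | github.com/Mister-eX/Hackerrank-solutions | Algorithms/Greedy/greedy florist.py | getMinimumCost
-- ===== SOURCE A (Python) =====
-- def getMinimumCost(org_price, k):
--     n = len(org_price) - 1
--     org_price.sort()
--     ans =0
--     count = 0
--     while n >= 0:
--         i = k
--         while i > 0:
--             x = org_price[n] * (count + 1)
--             n -= 1
--             ans += x
--             i -= 1
--             if n <0:
--                 return ans
--
--         count += 1
--
--     return ans
-- ===== SOURCE B (Python) =====
-- def getMinimumCost(org_price, k):
--     # Sort ascending in place (same mutation as A), build a prefix-sum table once,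
--     # then charge the flowers in rounds: each round of purchases adds one whole
--     # prefix sum pref[L] (the L cheapest flowers still "re-charged"), and L shrinks
--     # by k per round.  Total = sum of pref[n], pref[n-k], pref[n-2k], ...
--     org_price.sort()
--     pref = [0]
--     for p in org_price:
--         pref.append(pref[-1] + p)
--     total = 0
--     L = len(org_price)
--     while L > 0:
--         total += pref[L]
--         L -= k
--     return total
-- ===== Notes on version B (the rewrite author's own statement) =====
-- stated objective: alternative
-- what changed: Instead of A's nested per-flower loops assigning each flower its multiplier, B precomputes a prefix-sum table of the ascending prices and sums whole prefixes pref[n], pref[n-k], pref[n-2k], ... (each round re-charges all flowers still in a shrinking prefix), so no per-element multiplier is ever computed.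
import Mathlib
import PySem

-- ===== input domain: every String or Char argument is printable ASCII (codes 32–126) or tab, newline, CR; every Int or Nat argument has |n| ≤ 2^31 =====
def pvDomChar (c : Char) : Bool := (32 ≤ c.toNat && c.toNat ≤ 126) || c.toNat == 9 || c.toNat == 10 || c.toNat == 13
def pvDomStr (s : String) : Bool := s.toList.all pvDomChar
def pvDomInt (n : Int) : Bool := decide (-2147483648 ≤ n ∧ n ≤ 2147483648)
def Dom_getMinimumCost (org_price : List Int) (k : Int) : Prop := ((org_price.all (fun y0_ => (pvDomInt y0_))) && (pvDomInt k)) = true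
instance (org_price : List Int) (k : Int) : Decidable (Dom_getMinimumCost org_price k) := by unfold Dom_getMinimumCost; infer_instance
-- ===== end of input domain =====

-- B replaces A's per-flower multiplier assignment by a prefix-sum table summed over
-- shrinking prefixes; equivalence is about the RETURN value (both sort the argument
-- ascending in place, so the observable mutation is identical).

-- ===== PORT A =====
-- inner 'while i > 0' loop of A; returns (n, ans, returned-early?).
-- 'org_price[n]' is PySem.List.pyGet?; in A the index n is always in range when read
-- (the loops guard n ≥ 0 and n starts at len-1), so the .getD 0 default is never used.
def pvInnerA (xs : List Int) (count : Int) : Int → Int → Int → Int × Int × Bool :=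
  fun n ans i =>
    if h : i > 0 then
      let x := (PySem.List.pyGet? xs n).getD 0 * (count + 1)
      let n' := n - 1
      let ans' := ans + x
      if n' < 0 then (n', ans', true)
      else pvInnerA xs count n' ans' (i - 1)
    else (n, ans, false)
  termination_by n ans i => i.toNat
  decreasing_by omega

-- outer 'while n >= 0' loop; fuel only makes the recursion total (A diverges when k ≤ 0
-- and the list is nonempty — those inputs are outside Pre_); under Pre_ the fuel suffices.
def pvOuterA (xs : List Int) (k : Int) : Nat → Int → Int → Int → Int
  | 0, _, ans, _ => ans
  | fuel + 1, n, ans, count =>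
    if n ≥ 0 then
      let r := pvInnerA xs count n ans k
      if r.2.2 then r.2.1 else pvOuterA xs k fuel r.1 r.2.1 (count + 1)
    else ans

def getMinimumCost (org_price : List Int) (k : Int) : Int :=
  let s := PySem.List.sorted org_price (fun x => x) false
  pvOuterA s k (org_price.length + 1) ((org_price.length : Int) - 1) 0 0

-- ===== PORT B =====
-- pref = [0]; for p in s: pref.append(pref[-1] + p)
def pvPrefB (s : List Int) : List Int :=
  s.foldl (fun pref p => pref ++ [(PySem.List.pyGet? pref (-1)).getD 0 + p]) [0]

-- while L > 0: total += pref[L]; L -= k   (fuel only makes it total; B diverges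
-- exactly where A does — k ≤ 0 with a nonempty list, excluded by Pre_)
def pvLoopB (pref : List Int) (k : Int) : Nat → Int → Int → Int
  | 0, _, total => total
  | fuel + 1, L, total =>
    if L > 0 then pvLoopB pref k fuel (L - k) (total + (PySem.List.pyGet? pref L).getD 0)
    else total

def getMinimumCost_alt (org_price : List Int) (k : Int) : Int :=
  let s := PySem.List.sorted org_price (fun x => x) false
  let pref := pvPrefB s
  pvLoopB pref k (s.length + 1) (s.length : Int) 0

-- ===== PRECONDITION & SPEC =====
-- Pre_ excludes k ≤ 0 with a nonempty list: there A's outer loop never advances and it DIVERGES.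
def Pre_getMinimumCost (org_price : List Int) (k : Int) : Prop := org_price = [] ∨ 1 ≤ k
instance (org_price : List Int) (k : Int) : Decidable (Pre_getMinimumCost org_price k) := by unfold Pre_getMinimumCost; infer_instance
def pvWitness_getMinimumCost : List Int × Int := ([2, 5, 6], 2)

def Spec_getMinimumCost (org_price : List Int) (k : Int) (out : Int) : Prop := out = getMinimumCost_alt org_price k
instance (org_price : List Int) (k : Int) (out : Int) : Decidable (Spec_getMinimumCost org_price k out) := by unfold Spec_getMinimumCost; infer_instance

-- ===== CLAIM (what is proved, stated in full; the proofs are below) =====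
def Claim_equal_getMinimumCost : Prop := ∀ (org_price : List Int) (k : Int), Dom_getMinimumCost org_price k → Pre_getMinimumCost org_price k → Spec_getMinimumCost org_price k (getMinimumCost org_price k)

-- ===== LEMMAS AND PROOFS =====

-- "price-with-multiplier" sum of a descending segment starting at global position j
def pvT (k : Int) : List Int → Int → Int
  | [], _ => 0
  | p :: rest, j => p * (PySem.Int.floordiv j k + 1) + pvT k rest (j + 1)

theorem pvT_append (k : Int) (a b : List Int) (j : Int) :
    pvT k (a ++ b) j = pvT k a j + pvT k b (j + a.length) := by
  induction a generalizing j with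
  | nil => simp [pvT]
  | cons p rest ih =>
    simp only [List.cons_append, pvT, ih (j + 1), List.length_cons]
    push_cast
    ring_nf

theorem pvT_const (k c : Int) (l : List Int) (j : Int)
    (h : ∀ t : Nat, t < l.length → PySem.Int.floordiv (j + t) k = c) :
    pvT k l j = (c + 1) * l.sum := by
  induction l generalizing j with
  | nil => simp [pvT]
  | cons p rest ih =>
    have h0 := h 0 (by simp)
    simp at h0
    rw [pvT, h0, ih (j + 1) (fun t ht => by
      have := h (t + 1) (by simp; omega)
      push_cast at this ⊢
      rw [show j + 1 + (t : Int) = j + ((t : Int) + 1) by ring]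
      exact this)]
    simp [List.sum_cons]
    ring

-- shifting the start position by one divisor adds one whole sum of the segment
theorem pvT_shift (k : Int) (hk : 0 < k) (l : List Int) (j : Int) :
    pvT k l (j + k) = pvT k l j + l.sum := by
  induction l generalizing j with
  | nil => simp [pvT]
  | cons p rest ih =>
    have hfd : PySem.Int.floordiv (j + k) k = PySem.Int.floordiv j k + 1 := by
      rw [PySem.Int.floordiv_eq_ediv_of_pos hk, PySem.Int.floordiv_eq_ediv_of_pos hk]
      have := Int.add_mul_ediv_right j 1 (ne_of_gt hk)
      simpa using this
    rw [pvT, pvT, hfd, show j + k + 1 = (j + 1) + k by ring, ih (j + 1)]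
    simp [List.sum_cons]
    ring

theorem pvInnerA_spec (s : List Int) (count : Int) (i m : Nat) (ans : Int)
    (hi : 1 ≤ i) (hm : 1 ≤ m) (hL : m ≤ s.length) :
    pvInnerA s count ((m : Int) - 1) ans (i : Int) =
      if m ≤ i then (-1, ans + (count + 1) * (s.reverse.drop (s.length - m)).sum, true)
      else ((m : Int) - 1 - i, ans + (count + 1) * ((s.reverse.drop (s.length - m)).take i).sum, false) := by
  induction m generalizing i ans with
  | zero => omega
  | succ m' ih =>
    rw [pvInnerA]
    have hidx : s.length - (m' + 1) < s.reverse.length := by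
      rw [List.length_reverse]; omega
    have hget : (PySem.List.pyGet? s ((↑(m' + 1) : Int) - 1)).getD 0
        = s.reverse[s.length - (m' + 1)] := by
      rw [List.getElem_reverse]
      rw [show ((↑(m' + 1) : Int) - 1) = ((m' : Nat) : Int) by push_cast; ring]
      rw [PySem.List.pyGet?_natCast]
      have hm' : m' < s.length := by omega
      rw [List.getElem?_eq_getElem hm']
      simp only [Option.getD_some]
      congr 1
      omega
    have hdropcons : s.reverse.drop (s.length - (m' + 1))
        = s.reverse[s.length - (m' + 1)] :: s.reverse.drop (s.length - (m' + 1) + 1) :=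
      List.drop_eq_getElem_cons hidx
    rw [dif_pos (show ((i : Nat) : Int) > 0 by exact_mod_cast hi)]
    simp only [hget]
    by_cases hm1 : m' = 0
    · subst hm1
      rw [if_pos (show ((0 + 1 : Nat) : Int) - 1 - 1 < 0 by norm_num)]
      rw [if_pos (by omega : 0 + 1 ≤ i)]
      rw [hdropcons, show s.reverse.drop (s.length - (0 + 1) + 1) = [] from
        List.drop_eq_nil_of_le (by rw [List.length_reverse]; omega)]
      simp only [Prod.mk.injEq, List.sum_cons, List.sum_nil]
      and_intros <;> first | trivial | (push_cast; ring)
    · rw [if_neg (show ¬ (((m' + 1 : Nat) : Int) - 1 - 1 < 0) by push_cast; omega)]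
      by_cases hi1 : i = 1
      · subst hi1
        rw [pvInnerA]
        rw [dif_neg (show ¬ (((1:Nat):Int) - 1 > 0) by norm_num)]
        rw [if_neg (by omega : ¬ m' + 1 ≤ 1)]
        rw [hdropcons]
        simp only [Prod.mk.injEq, List.take_succ_cons, List.take_zero, List.sum_cons, List.sum_nil]
        and_intros <;> first | trivial | (push_cast; ring)
      · have hi2 : 1 ≤ i - 1 := by omega
        rw [show ((m' + 1 : Nat) : Int) - 1 - 1 = ((m' : Nat) : Int) - 1 by push_cast; ring,
            show ((i : Nat) : Int) - 1 = ((i - 1 : Nat) : Int) by push_cast; omega]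
        rw [ih (i - 1) _ hi2 (by omega) (by omega)]
        have hds : s.length - m' = s.length - (m' + 1) + 1 := by omega
        by_cases hle : m' + 1 ≤ i
        · rw [if_pos (by omega : m' ≤ i - 1), if_pos hle]
          rw [hds, hdropcons]
          simp only [Prod.mk.injEq, List.sum_cons]
          and_intros <;> first | trivial | (push_cast; ring)
        · rw [if_neg (by omega : ¬ m' ≤ i - 1), if_neg hle]
          rw [hds, hdropcons]
          have htake : (s.reverse[s.length - (m'+1)] :: s.reverse.drop (s.length - (m'+1) + 1)).take i
              = s.reverse[s.length - (m'+1)] :: (s.reverse.drop (s.length - (m'+1) + 1)).take (i - 1) := by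
            cases i with
            | zero => omega
            | succ i' => rw [List.take_succ_cons]; congr 1
          rw [htake]
          simp only [Prod.mk.injEq, List.sum_cons]
          refine ⟨by push_cast; omega, by ring, trivial⟩

theorem pvOuterA_spec (s : List Int) (k : Int) (hk : 1 ≤ k) (m fuel : Nat) (ans count : Int)
    (hL : m ≤ s.length) (hfuel : m ≤ fuel)
    (hcount : count * k = (s.length : Int) - m) :
    pvOuterA s k fuel ((m : Int) - 1) ans count
      = ans + pvT k (s.reverse.drop (s.length - m)) ((s.length : Int) - m) := by
  induction fuel using Nat.strong_induction_on generalizing m ans count with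
  | _ fuel ihf =>
  cases m with
  | zero =>
    rw [show s.reverse.drop (s.length - 0) = [] from
      List.drop_eq_nil_of_le (by rw [List.length_reverse]; omega)]
    cases fuel with
    | zero => simp [pvOuterA, pvT]
    | succ f => simp [pvOuterA, pvT]
  | succ m' =>
    cases fuel with
    | zero => omega
    | succ f =>
      have hkN : k = ((k.toNat : Nat) : Int) := by omega
      have hik : 1 ≤ k.toNat := by omega
      have hinner := pvInnerA_spec s count k.toNat (m' + 1) ans hik (by omega) hL
      rw [← hkN] at hinner
      have hlenD : (s.reverse.drop (s.length - (m' + 1))).length = m' + 1 := by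
        rw [List.length_drop, List.length_reverse]; omega
      have hmul : (count + 1) * k = count * k + k := by ring
      rw [pvOuterA, if_pos (show ((m' + 1 : Nat) : Int) - 1 ≥ 0 by push_cast; omega), hinner]
      by_cases hle : m' + 1 ≤ k.toNat
      · rw [if_pos hle]
        dsimp only
        rw [if_pos rfl]
        rw [pvT_const k count _ ((s.length : Int) - ((m' + 1 : Nat) : Int))
          (fun t ht => by
            rw [PySem.Int.floordiv_eq_iff_of_pos (by omega)]
            rw [hlenD] at ht
            omega)]
      · rw [if_neg hle]
        dsimp only
        rw [if_neg (by decide : ¬ (false = true))]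
        have harg : ((m' + 1 : Nat) : Int) - 1 - ((k.toNat : Nat) : Int)
            = (((m' + 1 - k.toNat : Nat)) : Int) - 1 := by omega
        rw [hkN, harg, ← hkN,
          ihf f (by omega) (m' + 1 - k.toNat) _ (count + 1) (by omega) (by omega) (by omega)]
        have h2 : (s.reverse.drop (s.length - (m' + 1))).drop k.toNat
            = s.reverse.drop (s.length - (m' + 1 - k.toNat)) := by
          rw [List.drop_drop]
          congr 1
          omega
        conv_rhs => rw [show s.reverse.drop (s.length - (m' + 1))
            = (s.reverse.drop (s.length - (m' + 1))).take k.toNat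
              ++ s.reverse.drop (s.length - (m' + 1 - k.toNat)) by
          rw [← h2, List.take_append_drop]]
        rw [pvT_append]
        have hlenT : ((s.reverse.drop (s.length - (m' + 1))).take k.toNat).length = k.toNat := by
          rw [List.length_take, hlenD]; omega
        rw [hlenT]
        rw [pvT_const k count _ ((s.length : Int) - ((m' + 1 : Nat) : Int))
          (fun t ht => by
            rw [PySem.Int.floordiv_eq_iff_of_pos (by omega)]
            rw [hlenT] at ht
            omega)]
        rw [show ((s.length : Int) - ((m' + 1 : Nat) : Int)) + ((k.toNat : Nat) : Int)
            = (s.length : Int) - ((m' + 1 - k.toNat : Nat) : Int) by omega]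
        ring

-- ---- B side ----

-- spine of B's prefix table: partial sums starting from c
def pvScan (c : Int) : List Int → List Int
  | [] => []
  | p :: rest => (c + p) :: pvScan (c + p) rest

theorem pvPrefB_foldl (s : List Int) (a : List Int) (c : Int) :
    s.foldl (fun pref p => pref ++ [(PySem.List.pyGet? pref (-1)).getD 0 + p]) (a ++ [c])
      = (a ++ [c]) ++ pvScan c s := by
  induction s generalizing a c with
  | nil => simp [pvScan]
  | cons p rest ih =>
    simp only [List.foldl_cons, PySem.List.pyGet?_neg_one_append_singleton, Option.getD_some]
    rw [show (a ++ [c]) ++ [c + p] = (a ++ [c]) ++ [c + p] from rfl]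
    have := ih (a ++ [c]) (c + p)
    rw [List.append_assoc] at this ⊢
    rw [this]
    simp [pvScan]

theorem pvPrefB_eq (s : List Int) : pvPrefB s = [0] ++ pvScan 0 s := by
  have := pvPrefB_foldl s [] 0
  simpa [pvPrefB] using this

theorem pvScan_getElem? (s : List Int) (c : Int) (j : Nat) (hj : j < s.length) :
    (pvScan c s)[j]? = some (c + (s.take (j + 1)).sum) := by
  induction s generalizing c j with
  | nil => simp at hj
  | cons p rest ih =>
    cases j with
    | zero => simp [pvScan]
    | succ j' =>
      simp only [pvScan, List.getElem?_cons_succ]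
      rw [ih (c + p) j' (by simpa using hj)]
      simp [List.sum_cons]
      ring

theorem pvPrefB_get (s : List Int) (L : Int) (h0 : 0 ≤ L) (hL : L ≤ (s.length : Int)) :
    (PySem.List.pyGet? (pvPrefB s) L).getD 0 = (s.take L.toNat).sum := by
  rw [pvPrefB_eq, show L = ((L.toNat : Nat) : Int) by omega, PySem.List.pyGet?_natCast]
  cases hLt : L.toNat with
  | zero => simp
  | succ j =>
    have hj : j < s.length := by omega
    simp only [List.cons_append, List.nil_append, List.getElem?_cons_succ]
    rw [pvScan_getElem? s 0 j hj]
    simp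

theorem pvLoopB_spec (s : List Int) (k : Int) (hk : 1 ≤ k) (fuel : Nat) (L total : Int)
    (h0 : 0 ≤ L) (hL : L ≤ (s.length : Int)) (hfuel : L.toNat ≤ fuel) :
    pvLoopB (pvPrefB s) k fuel L total = total + pvT k (s.take L.toNat).reverse 0 := by
  induction fuel using Nat.strong_induction_on generalizing L total with
  | _ fuel ihf =>
  cases fuel with
  | zero =>
    have : L = 0 := by omega
    subst this
    simp [pvLoopB, pvT]
  | succ f =>
    by_cases hpos : L > 0
    · rw [pvLoopB, if_pos hpos, pvPrefB_get s L h0 hL]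
      have hlenTake : (s.take L.toNat).length = L.toNat := by
        rw [List.length_take]; omega
      by_cases hrest : L - k > 0
      · -- more than one round remains
        rw [ihf f (by omega) (L - k) _ (by omega) (by omega) (by omega)]
        -- split take L into take (L-k) ++ middle chunk of length k
        have hsplit : s.take L.toNat
            = s.take (L - k).toNat ++ (s.take L.toNat).drop (L - k).toNat := by
          conv_lhs => rw [← List.take_append_drop (L - k).toNat (s.take L.toNat)]
          rw [List.take_take, Nat.min_eq_left (by omega)]
        have hmidlen : ((s.take L.toNat).drop (L - k).toNat).length = k.toNat := by
          rw [List.length_drop, hlenTake]; omega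
        have hmid : pvT k ((s.take L.toNat).drop (L - k).toNat).reverse 0
            = (0 + 1) * ((s.take L.toNat).drop (L - k).toNat).reverse.sum :=
          pvT_const k 0 _ 0 (fun t ht => by
            rw [PySem.Int.floordiv_eq_iff_of_pos (by omega)]
            rw [List.length_reverse, hmidlen] at ht
            omega)
        have hshift : pvT k (s.take (L - k).toNat).reverse (0 + k)
            = pvT k (s.take (L - k).toNat).reverse 0 + (s.take (L - k).toNat).reverse.sum :=
          pvT_shift k (by omega) _ 0
        have hsum : (s.take L.toNat).sum
            = ((s.take L.toNat).drop (L - k).toNat).sum + (s.take (L - k).toNat).sum := by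
          conv_lhs => rw [hsplit]
          rw [List.sum_append]
          ring
        conv_rhs => rw [hsplit, List.reverse_append, pvT_append,
          List.length_reverse, hmidlen,
          show (0 : Int) + ((k.toNat : Nat) : Int) = 0 + k by omega,
          hshift, hmid]
        simp only [List.sum_reverse]
        rw [hsum]
        ring
      · -- final round: L ≤ k, the next call sees L - k ≤ 0
        have hstop : pvLoopB (pvPrefB s) k f (L - k) (total + (s.take L.toNat).sum)
            = total + (s.take L.toNat).sum := by
          cases f with
          | zero => simp [pvLoopB]
          | succ f' => rw [pvLoopB, if_neg (by omega)]
        rw [hstop, pvT_const k 0 _ 0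
          (fun t ht => by
            rw [PySem.Int.floordiv_eq_iff_of_pos (by omega)]
            rw [List.length_reverse, hlenTake] at ht
            omega)]
        rw [List.sum_reverse]
        ring
    · have : L = 0 := by omega
      subst this
      rw [pvLoopB, if_neg (by omega)]
      simp [pvT]

-- ===== VERDICT (by name: the statement is the Claim_ definition above) =====
theorem getMinimumCost_spec : Claim_equal_getMinimumCost := by
  intro org_price k _ hpre
  unfold Spec_getMinimumCost getMinimumCost getMinimumCost_alt
  simp only
  set s := PySem.List.sorted org_price (fun x => x) false with hs
  have hlen : s.length = org_price.length := by
    rw [hs]; exact PySem.List.length_sorted _ _ _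
  rcases hpre with hnil | hk
  · subst hnil
    simp [hs, pvOuterA, pvLoopB, PySem.List.sorted]
  · rw [pvLoopB_spec s k hk (s.length + 1) (s.length : Int) 0 (by omega) (by omega) (by omega)]
    rw [show ((s.length : Nat) : Int).toNat = s.length by omega, List.take_length]
    rw [← hlen]
    have := pvOuterA_spec s k hk s.length (s.length + 1) 0 0 (le_refl _) (by omega) (by simp)
    simp at this
    rw [this]
    simp
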